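-- pv_equiv track=rewrite | github.com/KaifAhmad1/repo-analyzer | src/servers/repository_structure_server.py | _calculate_file_metrics
-- ===== SOURCE A (Python) =====
-- from typing import Dict, Any, List, Optional, Union
--
-- def _calculate_file_metrics(content: str) -> Dict[str, Any]:
--     """Calculate file metrics"""
--     lines = content.split('\n')
--     return {
--         "total_lines": len(lines),
--         "code_lines": len([line for line in lines if line.strip() and not line.strip().startswith('#')]),
--         "comment_lines": len([line for line in lines if line.strip().startswith('#')]),
--         "blank_lines": len([line for line in lines if not line.strip()])
--     }
-- ===== SOURCE B (Python) =====
-- def _calculate_file_metrics(content: str):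
--     """Calculate file metrics (single classifying pass instead of four scans)"""
--     lines = content.split('\n')
--     code = comment = blank = 0
--     for line in lines:
--         s = line.strip()
--         if not s:
--             blank += 1
--         elif s.startswith('#'):
--             comment += 1
--         else:
--             code += 1
--     return {
--         "total_lines": len(lines),
--         "code_lines": code,
--         "comment_lines": comment,
--         "blank_lines": blank,
--     }
-- ===== Notes on version B (the rewrite author's own statement) =====
-- stated objective: simpler
-- what changed: Replaces A's four independent scans (three filtering comprehensions plus len) with one explicit loop that strips each line once and increments exactly one of three counters.
import Mathlib
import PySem

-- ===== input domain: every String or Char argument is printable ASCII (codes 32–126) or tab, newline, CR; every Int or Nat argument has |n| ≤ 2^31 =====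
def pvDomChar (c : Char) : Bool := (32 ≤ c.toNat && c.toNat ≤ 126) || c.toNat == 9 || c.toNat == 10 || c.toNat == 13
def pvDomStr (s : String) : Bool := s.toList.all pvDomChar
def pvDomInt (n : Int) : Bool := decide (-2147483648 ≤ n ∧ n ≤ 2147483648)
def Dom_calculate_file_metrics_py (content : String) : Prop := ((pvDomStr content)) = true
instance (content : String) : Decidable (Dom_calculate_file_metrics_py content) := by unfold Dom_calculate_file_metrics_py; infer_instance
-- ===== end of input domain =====

-- B counts the line categories in one classifying pass (strip once per line) instead of A's four scans.


-- ===== PORT A =====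
-- content.split('\n'): separator is nonempty so split? is always `some`; getD [] is never taken.
def calculate_file_metrics_py (content : String) : List (String × Int) :=
  let lines := (PySem.Str.split? content "\n").getD []
  [ ("total_lines", (lines.length : Int)),
    ("code_lines", ((lines.filter (fun line => (PySem.Str.strip line ≠ "") && !(PySem.Str.startswith (PySem.Str.strip line) "#"))).length : Int)),
    ("comment_lines", ((lines.filter (fun line => PySem.Str.startswith (PySem.Str.strip line) "#")).length : Int)),
    ("blank_lines", ((lines.filter (fun line => !(PySem.Str.strip line ≠ ""))).length : Int)) ]

-- ===== PORT B =====
-- the single classifying loop: state (code, comment, blank)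
def cfmCount (acc : Int × Int × Int) (line : String) : Int × Int × Int :=
  let s := PySem.Str.strip line
  if s = "" then (acc.1, acc.2.1, acc.2.2 + 1)
  else if PySem.Str.startswith s "#" then (acc.1, acc.2.1 + 1, acc.2.2)
  else (acc.1 + 1, acc.2.1, acc.2.2)

def calculate_file_metrics_py_alt (content : String) : List (String × Int) :=
  let lines := (PySem.Str.split? content "\n").getD []
  let r := lines.foldl cfmCount (0, 0, 0)
  [ ("total_lines", (lines.length : Int)),
    ("code_lines", r.1),
    ("comment_lines", r.2.1),
    ("blank_lines", r.2.2) ]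

-- ===== PRECONDITION & SPEC =====
def Spec_calculate_file_metrics_py (content : String) (out : List (String × Int)) : Prop := out = calculate_file_metrics_py_alt content
instance (content : String) (out : List (String × Int)) : Decidable (Spec_calculate_file_metrics_py content out) := by unfold Spec_calculate_file_metrics_py; infer_instance

-- ===== CLAIM (what is proved, stated in full; the proofs are below) =====
def Claim_equal_calculate_file_metrics_py : Prop := ∀ (content : String), Dom_calculate_file_metrics_py content → Spec_calculate_file_metrics_py content (calculate_file_metrics_py content)

-- ===== LEMMAS AND PROOFS =====

lemma cfmCount_foldl (lines : List String) (c m b : Int) :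
    lines.foldl cfmCount (c, m, b) =
      (c + ((lines.filter (fun line => (PySem.Str.strip line ≠ "") && !(PySem.Str.startswith (PySem.Str.strip line) "#"))).length : Int),
       m + ((lines.filter (fun line => PySem.Str.startswith (PySem.Str.strip line) "#")).length : Int),
       b + ((lines.filter (fun line => !(PySem.Str.strip line ≠ ""))).length : Int)) := by
  induction lines generalizing c m b with
  | nil => simp
  | cons hd tl ih =>
    simp only [List.foldl_cons, List.filter_cons, cfmCount]
    by_cases h0 : PySem.Str.strip hd = ""
    · simp [h0, (by decide : PySem.Chars.startswith ([] : List Char) ['#'] = false), ih]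
      try ring_nf; try omega
    · by_cases h1 : PySem.Chars.startswith (PySem.Chars.strip hd.toList) ['#']
      · simp [h0, h1, ih]; try ring_nf; try omega
      · simp [h0, h1, ih]; try ring_nf; try omega

-- ===== VERDICT (by name: the statement is the Claim_ definition above) =====
theorem calculate_file_metrics_py_spec : Claim_equal_calculate_file_metrics_py := by
  intro content _
  unfold Spec_calculate_file_metrics_py calculate_file_metrics_py calculate_file_metrics_py_alt
  simp [cfmCount_foldl]
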